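-- pv_equiv track=rewrite | github.com/Vaillus/revolut-expense-manager | src/utilities/data_loader.py | update_vendor_tags_config
-- ===== SOURCE A (Python) =====
-- from typing import List, Dict, Any, Optional
--
-- def update_vendor_tags_config(vendor_tags_config: dict, vendors: List[str], tags: List[str]) -> dict:
--     """Update vendor-tags associations configuration"""
--     updated_vendor_tags = vendor_tags_config.copy()
--
--     for vendor in vendors:
--         if vendor not in updated_vendor_tags:
--             updated_vendor_tags[vendor] = {}
--
--         for tag in tags:
--             if tag in updated_vendor_tags[vendor]:
--                 updated_vendor_tags[vendor][tag] += 1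
--             else:
--                 updated_vendor_tags[vendor][tag] = 1
--
--     return updated_vendor_tags
-- ===== SOURCE B (Python) =====
-- def update_vendor_tags_config(vendor_tags_config: dict, vendors, tags) -> dict:
--     """Update vendor-tags associations configuration.
--
--     Non-incremental rebuild: tally tags and vendors once into count tables,
--     then construct the result directly -- every existing vendor entry is
--     merged in closed form (each tag count grows by m*c for a vendor seen m
--     times), and vendors not yet configured are appended with fresh dicts.
--     Unlike A, the input's nested dicts are not mutated (same return value).
--     """
--     per_tag = {}
--     for t in tags:
--         per_tag[t] = per_tag.get(t, 0) + 1
--     vcnt = {}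
--     for v in vendors:
--         vcnt[v] = vcnt.get(v, 0) + 1
--
--     def merged(d, m):
--         out = {t: c + m * per_tag.get(t, 0) for t, c in d.items()}
--         for t, c in per_tag.items():
--             if t not in d:
--                 out[t] = m * c
--         return out
--
--     result = {v: merged(d, vcnt[v]) if v in vcnt else d
--               for v, d in vendor_tags_config.items()}
--     for v, m in vcnt.items():
--         if v not in vendor_tags_config:
--             result[v] = merged({}, m)
--     return result
-- ===== Notes on version B (the rewrite author's own statement) =====
-- stated objective: faster
-- what changed: B abandons A's nested vendors-x-tags mutate-in-place loop: it tallies tags and vendors once into two count tables and then rebuilds the result non-incrementally, merging each existing vendor entry in closed form (every tag count grows by m*c for a vendor occurring m times) and appending fresh dicts for new vendors; B does not mutate the input's nested dicts (same return value).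
import Mathlib
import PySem

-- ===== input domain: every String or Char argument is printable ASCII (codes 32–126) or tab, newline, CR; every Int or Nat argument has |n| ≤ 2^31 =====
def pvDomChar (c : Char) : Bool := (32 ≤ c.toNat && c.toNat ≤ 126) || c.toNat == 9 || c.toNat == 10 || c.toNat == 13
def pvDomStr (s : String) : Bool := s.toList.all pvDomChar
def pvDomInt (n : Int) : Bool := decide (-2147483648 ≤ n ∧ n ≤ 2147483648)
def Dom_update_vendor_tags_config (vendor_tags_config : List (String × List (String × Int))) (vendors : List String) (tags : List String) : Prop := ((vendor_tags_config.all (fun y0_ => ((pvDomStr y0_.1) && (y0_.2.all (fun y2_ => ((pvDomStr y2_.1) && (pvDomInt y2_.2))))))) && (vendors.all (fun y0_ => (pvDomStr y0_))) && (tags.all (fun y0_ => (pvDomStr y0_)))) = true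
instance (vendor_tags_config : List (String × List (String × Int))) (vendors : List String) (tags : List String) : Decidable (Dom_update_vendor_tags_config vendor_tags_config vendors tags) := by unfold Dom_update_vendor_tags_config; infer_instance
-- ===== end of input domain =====

-- B rebuilds the result from two count tables in closed form instead of A's nested mutate-in-place
-- loops; equivalence is about the RETURN value — A also mutates the argument's shallow-shared
-- nested dicts in place, B does not.

-- ===== PORT A =====
def update_vendor_tags_config (vendor_tags_config : List (String × List (String × Int))) (vendors : List String) (tags : List String) : List (String × List (String × Int)) :=
  -- dict of dicts, as in the Python; nested mutation becomes re-insertion at the vendor key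
  let updated : PySem.Dict String (PySem.Dict String Int) :=
    PySem.Dict.ofList (vendor_tags_config.map (fun p => (p.1, PySem.Dict.ofList p.2)))
  let final := vendors.foldl (fun acc vendor =>
    let acc1 := if acc.contains vendor then acc else acc.insert vendor PySem.Dict.empty
    tags.foldl (fun acc2 tag =>
      let d := acc2.getD vendor PySem.Dict.empty
      if d.contains tag then acc2.insert vendor (d.insert tag (d.getD tag 0 + 1))
      else acc2.insert vendor (d.insert tag 1)) acc1) updated
  final.items.map (fun p => (p.1, p.2.items))

-- ===== PORT B =====
def update_vendor_tags_config_alt (vendor_tags_config : List (String × List (String × Int))) (vendors : List String) (tags : List String) : List (String × List (String × Int)) :=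
  let per_tag : PySem.Dict String Int :=
    tags.foldl (fun m t => m.insert t (m.getD t 0 + 1)) PySem.Dict.empty
  let vcnt : PySem.Dict String Int :=
    vendors.foldl (fun m v => m.insert v (m.getD v 0 + 1)) PySem.Dict.empty
  let cfg : PySem.Dict String (PySem.Dict String Int) :=
    PySem.Dict.ofList (vendor_tags_config.map (fun p => (p.1, PySem.Dict.ofList p.2)))
  -- merged(d, m): dict comprehension over d.items (keys distinct) then the new tags appended;
  -- its insertion order is exactly this list, so the fresh dict's items are built directly
  let merged : PySem.Dict String Int → Int → List (String × Int) := fun d m =>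
    d.items.map (fun tc => (tc.1, tc.2 + m * per_tag.getD tc.1 0))
      ++ (per_tag.items.filter (fun tc => !d.contains tc.1)).map (fun tc => (tc.1, m * tc.2))
  -- result: comprehension over the config (distinct keys, original order), then new vendors
  -- appended in vcnt (first-occurrence) order — the result dict's items are this list
  (cfg.items.map (fun p =>
      (p.1, if vcnt.contains p.1 then merged p.2 (vcnt.getD p.1 0) else p.2.items)))
    ++ (vcnt.items.filter (fun vm => !cfg.contains vm.1)).map
        (fun vm => (vm.1, merged PySem.Dict.empty vm.2))

-- ===== PRECONDITION & SPEC =====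
def Spec_update_vendor_tags_config (vendor_tags_config : List (String × List (String × Int))) (vendors : List String) (tags : List String) (out : List (String × List (String × Int))) : Prop := out = update_vendor_tags_config_alt vendor_tags_config vendors tags
instance (vendor_tags_config : List (String × List (String × Int))) (vendors : List String) (tags : List String) (out : List (String × List (String × Int))) : Decidable (Spec_update_vendor_tags_config vendor_tags_config vendors tags out) := by unfold Spec_update_vendor_tags_config; infer_instance

-- ===== CLAIM (what is proved, stated in full; the proofs are below) =====
def Claim_equal_update_vendor_tags_config : Prop := ∀ (vendor_tags_config : List (String × List (String × Int))) (vendors : List String) (tags : List String), Dom_update_vendor_tags_config vendor_tags_config vendors tags → Spec_update_vendor_tags_config vendor_tags_config vendors tags (update_vendor_tags_config vendor_tags_config vendors tags)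

-- ===== LEMMAS AND PROOFS =====

-- proof-only abbreviations: the two per-tag update steps, the tag counter, one whole tag pass
def pvBump (d : PySem.Dict String Int) (t : String) : PySem.Dict String Int :=
  d.insert t (d.getD t 0 + 1)

def pvAddC (d : PySem.Dict String Int) (tc : String × Int) : PySem.Dict String Int :=
  d.insert tc.1 (d.getD tc.1 0 + tc.2)

def pvCnt (ts : List String) : PySem.Dict String Int :=
  ts.foldl (fun m t => m.insert t (m.getD t 0 + 1)) PySem.Dict.empty

def pvApply (ts : List String) (d : PySem.Dict String Int) : PySem.Dict String Int :=
  (pvCnt ts).items.foldl pvAddC d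

lemma pv_cnt_eq_counter (ts : List String) : pvCnt ts = PySem.Dict.counter ts :=
  PySem.Dict.foldl_insert_getD_add_one_eq_counter ts

lemma pv_cnt_nodup (ts : List String) : (pvCnt ts).keys.Nodup := by
  rw [pv_cnt_eq_counter]; exact PySem.Dict.nodup_keys_counter ts

-- re-inserting the value already stored at a present key is a no-op (keys nodup)
lemma pv_insert_getD_self {ν : Type} (d : PySem.Dict String ν) (k : String) (d0 : ν)
    (hc : d.contains k = true) (hnd : d.keys.Nodup) : d.insert k (d.getD k d0) = d := by
  apply PySem.Dict.ext_iff.mpr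
  rw [PySem.Dict.items_insert_of_contains d _ hc]
  have : ∀ p ∈ d.items, (if (p.1 == k) = true then (k, d.getD k d0) else p) = p := by
    intro p hp
    by_cases hk : p.1 = k
    · have hmem : (k, p.2) ∈ d.items := by rw [← hk]; exact hp
      rw [PySem.Dict.getD_of_mem_items d hmem hnd d0, ← hk]
      simp
    · simp [hk]
  rw [List.map_congr_left this, List.map_id']

-- inserts at distinct keys commute when the second key is already present
lemma pv_insert_comm {ν : Type} (d : PySem.Dict String ν) (s t : String) (a b : ν)
    (hne : s ≠ t) (ht : d.contains t = true) :
    (d.insert s a).insert t b = (d.insert t b).insert s a := by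
  apply PySem.Dict.ext_iff.mpr
  have ht' : (d.insert s a).contains t = true := by
    rw [PySem.Dict.contains_insert]; simp [ht]
  by_cases hs : d.contains s = true
  · have hs' : (d.insert t b).contains s = true := by
      rw [PySem.Dict.contains_insert]; simp [hs]
    rw [PySem.Dict.items_insert_of_contains _ _ ht', PySem.Dict.items_insert_of_contains _ _ hs,
        PySem.Dict.items_insert_of_contains _ _ hs', PySem.Dict.items_insert_of_contains _ _ ht,
        List.map_map, List.map_map]
    apply List.map_congr_left
    intro p _
    by_cases h1 : p.1 = s <;> by_cases h2 : p.1 = t <;>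
      simp [Function.comp, h1, h2, hne, Ne.symm hne]
  · have hs0 : d.contains s = false := by simpa using hs
    have hs' : (d.insert t b).contains s = false := by
      rw [PySem.Dict.contains_insert]
      simp [hs0, hne]
    rw [PySem.Dict.items_insert_of_contains _ _ ht', PySem.Dict.items_insert_of_not_contains _ _ hs0,
        PySem.Dict.items_insert_of_not_contains _ _ hs', PySem.Dict.items_insert_of_contains _ _ ht,
        List.map_append]
    simp [hne]

-- A's inner if collapses to pvBump
lemma pv_if_bump (d : PySem.Dict String Int) (t : String) :
    (if d.contains t then d.insert t (d.getD t 0 + 1) else d.insert t 1) = pvBump d t := by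
  unfold pvBump
  by_cases h : d.contains t = true
  · simp [h]
  · have h0 : d.contains t = false := by simpa using h
    rw [PySem.Dict.getD_of_not_contains d 0 h0]
    simp [h0]

-- hoisting: the per-tag loop that re-reads acc[v] each step equals one insert of the folded dict
lemma pv_hoist (ts : List String) (acc : PySem.Dict String (PySem.Dict String Int)) (v : String)
    (hc : acc.contains v = true) (hnd : acc.keys.Nodup) :
    ts.foldl (fun a t => a.insert v (pvBump (a.getD v PySem.Dict.empty) t)) acc
      = acc.insert v (ts.foldl pvBump (acc.getD v PySem.Dict.empty)) := by
  induction ts generalizing acc with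
  | nil =>
    exact (pv_insert_getD_self acc v PySem.Dict.empty hc hnd).symm
  | cons t ts ih =>
    rw [List.foldl_cons, List.foldl_cons,
        ih (acc.insert v (pvBump (acc.getD v PySem.Dict.empty) t))
          (by rw [PySem.Dict.contains_insert]; simp)
          (PySem.Dict.nodup_keys_insert acc v _ hnd),
        PySem.Dict.getD_insert_self, PySem.Dict.insert_insert_self]

-- bump commutes past pvAddC-steps at other keys when its key is present
lemma pv_bump_commute (l : List (String × Int)) (t : String) :
    ∀ (e : PySem.Dict String Int), (∀ p ∈ l, p.1 ≠ t) → e.contains t = true →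
    pvBump (l.foldl pvAddC e) t = l.foldl pvAddC (pvBump e t) := by
  intro e hl ht
  induction l generalizing e with
  | nil => rfl
  | cons sc l ih =>
    have hst : sc.1 ≠ t := hl sc (by simp)
    have hct : (pvAddC e sc).contains t = true := by
      unfold pvAddC; rw [PySem.Dict.contains_insert]; simp [ht]
    rw [List.foldl_cons, List.foldl_cons, ih (pvAddC e sc) (fun p hp => hl p (by simp [hp])) hct]
    congr 1
    unfold pvAddC pvBump
    rw [PySem.Dict.getD_insert_of_ne e _ _ (Ne.symm hst),
        PySem.Dict.getD_insert_of_ne e _ _ hst,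
        pv_insert_comm e sc.1 t _ _ hst ht]

-- appending one tag to the counter
lemma pv_cnt_append (ts : List String) (t : String) :
    pvCnt (ts ++ [t]) = (pvCnt ts).insert t ((pvCnt ts).getD t 0 + 1) := by
  unfold pvCnt
  rw [List.foldl_append, List.foldl_cons, List.foldl_nil]

-- counting first: folding the raw tag list equals folding the counter's items
lemma pv_counter (ts : List String) :
    ∀ (d : PySem.Dict String Int), ts.foldl pvBump d = (pvCnt ts).items.foldl pvAddC d := by
  induction ts using List.reverseRecOn with
  | nil => intro d; rfl
  | append_singleton ts t ih =>
    intro d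
    rw [List.foldl_append, List.foldl_cons, List.foldl_nil, ih d, pv_cnt_append]
    by_cases ht : (pvCnt ts).contains t = true
    · -- t already counted: the insert rewrites one entry in place
      obtain ⟨c, hget⟩ : ∃ c, (pvCnt ts).get? t = some c := by
        cases h : (pvCnt ts).get? t with
        | none => rw [PySem.Dict.get?_eq_none_iff_contains] at h; rw [h] at ht; cases ht
        | some c => exact ⟨c, rfl⟩
      have hmem : (t, c) ∈ (pvCnt ts).items := PySem.Dict.mem_items_of_get?_eq_some _ hget
      have hgetD : (pvCnt ts).getD t 0 = c := PySem.Dict.getD_of_get?_eq_some _ 0 hget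
      obtain ⟨l₁, l₂, hsplit⟩ := List.append_of_mem hmem
      have hnd := pv_cnt_nodup ts
      have hnd' : ((l₁ ++ (t, c) :: l₂).map Prod.fst).Nodup := by
        have : (pvCnt ts).keys = (l₁ ++ (t, c) :: l₂).map Prod.fst := by
          unfold PySem.Dict.keys; rw [hsplit]
        rw [← this]; exact hnd
      simp only [List.map_append, List.map_cons, List.nodup_append] at hnd'
      have h1 : ∀ p ∈ l₁, p.1 ≠ t := by
        intro p hp heq
        exact hnd'.2.2 p.1 (List.mem_map_of_mem hp) t (List.mem_cons_self) heq
      have h2 : ∀ p ∈ l₂, p.1 ≠ t := by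
        intro p hp heq
        exact (List.nodup_cons.mp hnd'.2.1).1 (by rw [← heq]; exact List.mem_map_of_mem hp)
      have hitems : ((pvCnt ts).insert t ((pvCnt ts).getD t 0 + 1)).items
          = l₁ ++ (t, c + 1) :: l₂ := by
        rw [PySem.Dict.items_insert_of_contains _ _ ht, hsplit, List.map_append, List.map_cons]
        congr 1
        · have heq1 : ∀ p ∈ l₁, (if (p.1 == t) = true then (t, (pvCnt ts).getD t 0 + 1) else p) = p := by
            intro p hp; simp [h1 p hp]
          rw [List.map_congr_left heq1, List.map_id']
        · congr 1
          · simp [hgetD]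
          · have heq2 : ∀ p ∈ l₂, (if (p.1 == t) = true then (t, (pvCnt ts).getD t 0 + 1) else p) = p := by
              intro p hp; simp [h2 p hp]
            rw [List.map_congr_left heq2, List.map_id']
      rw [hitems, hsplit, List.foldl_append, List.foldl_append, List.foldl_cons, List.foldl_cons]
      set e := l₁.foldl pvAddC d with he
      have hct : (pvAddC e (t, c)).contains t = true := by
        unfold pvAddC; rw [PySem.Dict.contains_insert]; simp
      rw [pv_bump_commute l₂ t (pvAddC e (t, c)) h2 hct]
      congr 1
      unfold pvAddC pvBump
      rw [PySem.Dict.getD_insert_self, PySem.Dict.insert_insert_self, add_assoc]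
    · -- new tag: the counter appends (t, 1)
      have ht0 : (pvCnt ts).contains t = false := by simpa using ht
      rw [PySem.Dict.items_insert_of_not_contains _ _ ht0, List.foldl_append, List.foldl_cons,
          List.foldl_nil, PySem.Dict.getD_of_not_contains _ 0 ht0]
      unfold pvAddC pvBump
      rw [zero_add]

-- one vendor step of A equals one clean insert of a whole tag pass
lemma pv_step (tags : List String) (acc : PySem.Dict String (PySem.Dict String Int)) (v : String)
    (hnd : acc.keys.Nodup) :
    tags.foldl (fun acc2 tag =>
      let d := acc2.getD v PySem.Dict.empty
      if d.contains tag then acc2.insert v (d.insert tag (d.getD tag 0 + 1))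
      else acc2.insert v (d.insert tag 1))
      (if acc.contains v then acc else acc.insert v PySem.Dict.empty)
    = acc.insert v (pvApply tags (acc.getD v PySem.Dict.empty)) := by
  have hfun : (fun (acc2 : PySem.Dict String (PySem.Dict String Int)) (tag : String) =>
      let d := acc2.getD v PySem.Dict.empty
      if d.contains tag then acc2.insert v (d.insert tag (d.getD tag 0 + 1))
      else acc2.insert v (d.insert tag 1))
      = (fun a t => a.insert v (pvBump (a.getD v PySem.Dict.empty) t)) := by
    funext a t
    show (if (a.getD v PySem.Dict.empty).contains t
          then a.insert v ((a.getD v PySem.Dict.empty).insert t ((a.getD v PySem.Dict.empty).getD t 0 + 1))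
          else a.insert v ((a.getD v PySem.Dict.empty).insert t 1)) = _
    rw [← apply_ite (fun e => a.insert v e), pv_if_bump]
  rw [hfun]
  unfold pvApply
  by_cases hc : acc.contains v = true
  · rw [if_pos hc, pv_hoist tags acc v hc hnd, pv_counter]
  · have hc0 : acc.contains v = false := by simpa using hc
    rw [if_neg (by simp [hc0]),
        pv_hoist tags _ v (by rw [PySem.Dict.contains_insert]; simp)
          (PySem.Dict.nodup_keys_insert acc v _ hnd),
        PySem.Dict.getD_insert_self, PySem.Dict.insert_insert_self, pv_counter,
        PySem.Dict.getD_of_not_contains acc _ hc0]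

-- the whole vendors loop of A in clean insert form
lemma pv_loop (tags vendors : List String) :
    ∀ (acc : PySem.Dict String (PySem.Dict String Int)), acc.keys.Nodup →
    vendors.foldl (fun acc vendor =>
      let acc1 := if acc.contains vendor then acc else acc.insert vendor PySem.Dict.empty
      tags.foldl (fun acc2 tag =>
        let d := acc2.getD vendor PySem.Dict.empty
        if d.contains tag then acc2.insert vendor (d.insert tag (d.getD tag 0 + 1))
        else acc2.insert vendor (d.insert tag 1)) acc1) acc
    = vendors.foldl (fun acc vendor =>
        acc.insert vendor (pvApply tags (acc.getD vendor PySem.Dict.empty))) acc := by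
  induction vendors with
  | nil => intro acc _; rfl
  | cons v vs ih =>
    intro acc hnd
    rw [List.foldl_cons, List.foldl_cons]
    have h := pv_step tags acc v hnd
    have hnd' : (acc.insert v (pvApply tags (acc.getD v PySem.Dict.empty))).keys.Nodup :=
      PySem.Dict.nodup_keys_insert acc v _ hnd
    calc vs.foldl _ ((fun acc vendor =>
          let acc1 := if acc.contains vendor then acc else acc.insert vendor PySem.Dict.empty
          tags.foldl (fun acc2 tag =>
            let d := acc2.getD vendor PySem.Dict.empty
            if d.contains tag then acc2.insert vendor (d.insert tag (d.getD tag 0 + 1))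
            else acc2.insert vendor (d.insert tag 1)) acc1) acc v)
        = vs.foldl _ (acc.insert v (pvApply tags (acc.getD v PySem.Dict.empty))) := by
          rw [show ((fun acc vendor =>
              let acc1 := if acc.contains vendor then acc else acc.insert vendor PySem.Dict.empty
              tags.foldl (fun acc2 tag =>
                let d := acc2.getD vendor PySem.Dict.empty
                if d.contains tag then acc2.insert vendor (d.insert tag (d.getD tag 0 + 1))
                else acc2.insert vendor (d.insert tag 1)) acc1) acc v)
              = acc.insert v (pvApply tags (acc.getD v PySem.Dict.empty)) from h]
      _ = _ := ih _ hnd'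

-- Set.update with the same list twice is the same as once
lemma pv_update_idem (s : PySem.Set String) (xs : List String) :
    PySem.Set.update (PySem.Set.update s xs) xs = PySem.Set.update s xs := by
  rw [PySem.Set.update_eq_append_filter (PySem.Set.update s xs) xs]
  have : (PySem.Set.ofList xs).filter
      (fun y => !(PySem.Set.update s xs).contains y) = [] := by
    rw [List.filter_eq_nil_iff]
    intro y hy
    have hmem : y ∈ PySem.Set.update s xs :=
      (PySem.Set.mem_update s xs y).mpr (Or.inr ((PySem.Set.mem_ofList xs y).mp hy))
    have hc : (PySem.Set.update s xs).contains y = true :=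
      (PySem.Set.contains_iff _ y).mpr hmem
    simp only [hc, Bool.not_true]
    exact Bool.false_ne_true
  rw [this, List.append_nil]

-- Dict.contains agrees with Set.contains on the key list
lemma pv_contains_keys {ν : Type} (d : PySem.Dict String ν) (k : String) :
    d.contains k = PySem.Set.contains d.keys k := by
  rw [PySem.Dict.contains_eq_decide_mem_keys]
  by_cases h : k ∈ d.keys
  · simp [h]
  · simp [h]

-- getD after one pvAddC pass over a keyed map
lemma pv_foldl_addC_map_getD (S : List String) (f : String → Int) :
    ∀ (d : PySem.Dict String Int) (t : String), S.Nodup →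
    ((S.map (fun k => (k, f k))).foldl pvAddC d).getD t 0
      = d.getD t 0 + (if t ∈ S then f t else 0) := by
  induction S with
  | nil => intro d t _; simp
  | cons s S ih =>
    intro d t hnd
    rw [List.map_cons, List.foldl_cons]
    have hnd' := (List.nodup_cons.mp hnd).2
    have hs := (List.nodup_cons.mp hnd).1
    rw [ih _ t hnd']
    by_cases hts : t = s
    · subst hts
      rw [if_neg hs, if_pos (by simp : t ∈ t :: S)]
      show (d.insert t (d.getD t 0 + f t)).getD t 0 + 0 = _
      rw [PySem.Dict.getD_insert_self]
      ring
    · simp only [pvAddC]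
      rw [PySem.Dict.getD_insert_of_ne d _ _ hts]
      by_cases htS : t ∈ S <;> simp [hts, htS]

-- getD after one whole tag pass: every key grows by its tag count
lemma pv_apply_getD (ts : List String) (d : PySem.Dict String Int) (t : String) :
    (pvApply ts d).getD t 0 = d.getD t 0 + (pvCnt ts).getD t 0 := by
  unfold pvApply
  rw [PySem.Dict.items_eq_map_keys (pvCnt ts) (pv_cnt_nodup ts) 0,
      pv_foldl_addC_map_getD (pvCnt ts).keys (fun k => (pvCnt ts).getD k 0) d t (pv_cnt_nodup ts)]
  by_cases ht : t ∈ (pvCnt ts).keys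
  · rw [if_pos ht]
  · rw [if_neg ht, PySem.Dict.getD_of_not_contains (pvCnt ts) 0
      (by rw [PySem.Dict.contains_eq_decide_mem_keys]; simp [ht])]

-- getD after m whole tag passes
lemma pv_applyN_getD (ts : List String) (m : ℕ) (d : PySem.Dict String Int) (t : String) :
    ((pvApply ts)^[m] d).getD t 0 = d.getD t 0 + (m : Int) * (pvCnt ts).getD t 0 := by
  induction m with
  | zero => simp
  | succ n ih =>
    rw [Function.iterate_succ_apply', pv_apply_getD, ih]
    push_cast
    ring

-- keys after one whole tag pass
lemma pv_apply_keys (ts : List String) (d : PySem.Dict String Int) :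
    (pvApply ts d).keys = PySem.Set.update d.keys (pvCnt ts).keys := by
  unfold pvApply
  have h := PySem.Dict.keys_foldl_insert_key (pvCnt ts).items Prod.fst
    (fun (d : PySem.Dict String Int) (tc : String × Int) => d.getD tc.1 0 + tc.2) d
  simpa [pvAddC, PySem.Dict.keys] using h

-- keys after m ≥ 1 whole tag passes
lemma pv_applyN_keys (ts : List String) (n : ℕ) (d : PySem.Dict String Int) :
    ((pvApply ts)^[n + 1] d).keys = PySem.Set.update d.keys (pvCnt ts).keys := by
  induction n with
  | zero => simpa using pv_apply_keys ts d
  | succ n ih =>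
    rw [Function.iterate_succ_apply', pv_apply_keys, ih, pv_update_idem]

-- keys stay nodup through the tag passes
lemma pv_applyN_nodup (ts : List String) (m : ℕ) (d : PySem.Dict String Int)
    (hd : d.keys.Nodup) : ((pvApply ts)^[m] d).keys.Nodup := by
  induction m with
  | zero => simpa using hd
  | succ n ih =>
    rw [Function.iterate_succ_apply', pv_apply_keys]
    exact PySem.Set.nodup_update _ _ ih

-- m ≥ 1 whole tag passes produce exactly B's merged list
lemma pv_merged_eq (ts : List String) (n : ℕ) (d : PySem.Dict String Int)
    (hd : d.keys.Nodup) :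
    ((pvApply ts)^[n + 1] d).items
      = d.items.map (fun tc => (tc.1, tc.2 + ((n : Int) + 1) * (pvCnt ts).getD tc.1 0))
        ++ ((pvCnt ts).items.filter (fun tc => !d.contains tc.1)).map
            (fun tc => (tc.1, ((n : Int) + 1) * tc.2)) := by
  have hnd := pv_applyN_nodup ts (n + 1) d hd
  rw [PySem.Dict.items_eq_map_keys _ hnd 0, pv_applyN_keys,
      PySem.Set.update_eq_append_filter d.keys (pvCnt ts).keys,
      PySem.Set.ofList_eq_self_of_nodup _ (pv_cnt_nodup ts), List.map_append]
  congr 1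
  · rw [PySem.Dict.items_eq_map_keys d hd 0, List.map_map]
    apply List.map_congr_left
    intro k _
    simp only [Function.comp]
    have hcast : ((n + 1 : ℕ) : Int) = (n : Int) + 1 := by push_cast; ring
    rw [pv_applyN_getD, hcast]
  · rw [PySem.Dict.items_eq_map_keys (pvCnt ts) (pv_cnt_nodup ts) 0, List.filter_map,
        List.map_map]
    have hpred : ((fun tc : String × Int => !d.contains tc.1) ∘
        (fun k => (k, (pvCnt ts).getD k 0))) = fun y => !PySem.Set.contains d.keys y := by
      funext y
      simp only [Function.comp]
      rw [pv_contains_keys]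
    rw [hpred]
    apply List.map_congr_left
    intro k hk
    have hkd : k ∉ d.keys := by
      have hnc := (List.mem_filter.mp hk).2
      intro hmem
      have hc2 : PySem.Set.contains d.keys k = true :=
        (PySem.Set.contains_iff d.keys k).mpr hmem
      rw [hc2] at hnc
      simp at hnc
    simp only [Function.comp]
    rw [pv_applyN_getD,
        PySem.Dict.getD_of_not_contains d 0
          (by rw [PySem.Dict.contains_eq_decide_mem_keys]; simp [hkd])]
    have hcast : ((n + 1 : ℕ) : Int) = (n : Int) + 1 := by push_cast; ring
    rw [hcast, zero_add]

-- lookup through the clean vendors loop: each vendor is passed once per occurrence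
lemma pv_fold_getD (ts : List String) (vendors : List String) (v : String) :
    ∀ (acc : PySem.Dict String (PySem.Dict String Int)),
    (vendors.foldl (fun acc u => acc.insert u (pvApply ts (acc.getD u PySem.Dict.empty))) acc).getD
        v PySem.Dict.empty
      = (pvApply ts)^[vendors.count v] (acc.getD v PySem.Dict.empty) := by
  induction vendors with
  | nil => intro acc; simp
  | cons u vs ih =>
    intro acc
    rw [List.foldl_cons, ih]
    by_cases huv : v = u
    · subst huv
      rw [PySem.Dict.getD_insert_self, List.count_cons_self, Function.iterate_succ_apply]
    · rw [PySem.Dict.getD_insert_of_ne acc _ _ huv]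
      simp [Ne.symm huv]

-- every nested dict stored in the converted config has nodup keys
lemma pv_values_foldl_insert {κ ν : Type} [BEq κ] [LawfulBEq κ] (l : List (κ × ν)) :
    ∀ (d : PySem.Dict κ ν) (v : ν),
    v ∈ (l.foldl (fun d p => d.insert p.1 p.2) d).values → v ∈ d.values ∨ v ∈ l.map Prod.snd := by
  induction l with
  | nil => intro d v h; exact Or.inl h
  | cons p l ih =>
    intro d v h
    rcases ih (d.insert p.1 p.2) v h with h' | h'
    · rcases PySem.Dict.mem_values_insert d p.1 p.2 v h' with h'' | h''
      · exact Or.inr (by simp [h''])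
      · exact Or.inl h''
    · exact Or.inr (by simp [h'])

lemma pv_cfg_value_nodup (cfg : List (String × List (String × Int))) (k : String) :
    ((PySem.Dict.ofList (cfg.map (fun p => (p.1, PySem.Dict.ofList p.2)))).getD k
        PySem.Dict.empty).keys.Nodup := by
  set D := PySem.Dict.ofList (cfg.map (fun p => (p.1, PySem.Dict.ofList p.2))) with hD
  rw [PySem.Dict.getD_eq_get?_getD]
  cases hg : D.get? k with
  | none => simp [PySem.Dict.keys_empty]
  | some v =>
    have hmem : (k, v) ∈ D.items := PySem.Dict.mem_items_of_get?_eq_some _ hg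
    have hv : v ∈ D.values := by
      unfold PySem.Dict.values
      exact List.mem_map_of_mem (f := Prod.snd) hmem
    have : v ∈ (cfg.map (fun p => (p.1, PySem.Dict.ofList p.2))).map Prod.snd := by
      have h0 := pv_values_foldl_insert (cfg.map (fun p => (p.1, PySem.Dict.ofList p.2)))
        PySem.Dict.empty v (by rw [hD] at hv; exact hv)
      rcases h0 with h' | h'
      · simp [PySem.Dict.values, PySem.Dict.empty] at h'
      · exact h'
    rw [List.map_map] at this
    obtain ⟨p, _, hp⟩ := List.mem_map.mp this
    simp only [Function.comp] at hp
    subst hp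
    exact PySem.Dict.nodup_keys_ofList p.2


-- the whole equivalence, stated over the zeta/beta-expanded bodies of both ports
lemma pv_main (cfg : List (String × List (String × Int))) (vendors tags : List String) :
    ((vendors.foldl (fun acc vendor =>
        let acc1 := if acc.contains vendor then acc else acc.insert vendor PySem.Dict.empty
        tags.foldl (fun acc2 tag =>
          let d := acc2.getD vendor PySem.Dict.empty
          if d.contains tag then acc2.insert vendor (d.insert tag (d.getD tag 0 + 1))
          else acc2.insert vendor (d.insert tag 1)) acc1)
        (PySem.Dict.ofList (cfg.map (fun p => (p.1, PySem.Dict.ofList p.2))))).items.map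
      (fun p => (p.1, p.2.items)))
    = ((PySem.Dict.ofList (cfg.map (fun p => (p.1, PySem.Dict.ofList p.2)))).items.map (fun p =>
        (p.1, if (pvCnt vendors).contains p.1
              then p.2.items.map (fun tc => (tc.1, tc.2 + (pvCnt vendors).getD p.1 0 * (pvCnt tags).getD tc.1 0))
                ++ ((pvCnt tags).items.filter (fun tc => !p.2.contains tc.1)).map
                    (fun tc => (tc.1, (pvCnt vendors).getD p.1 0 * tc.2))
              else p.2.items)))
      ++ ((pvCnt vendors).items.filter (fun vm =>
            !(PySem.Dict.ofList (cfg.map (fun p => (p.1, PySem.Dict.ofList p.2)))).contains vm.1)).map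
          (fun vm => (vm.1,
            (PySem.Dict.empty : PySem.Dict String Int).items.map
              (fun tc => (tc.1, tc.2 + vm.2 * (pvCnt tags).getD tc.1 0))
            ++ ((pvCnt tags).items.filter
                  (fun tc => !(PySem.Dict.empty : PySem.Dict String Int).contains tc.1)).map
                (fun tc => (tc.1, vm.2 * tc.2)))) := by
  set D := PySem.Dict.ofList (cfg.map (fun p => (p.1, PySem.Dict.ofList p.2))) with hD
  have hDnd : D.keys.Nodup := PySem.Dict.nodup_keys_ofList _
  rw [pv_loop tags vendors D hDnd]
  set F := vendors.foldl (fun acc v => acc.insert v (pvApply tags (acc.getD v PySem.Dict.empty))) D with hF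
  have hFnd : F.keys.Nodup := PySem.Dict.nodup_keys_foldl_insert vendors _ D hDnd
  have hFkeys : F.keys = PySem.Set.update D.keys vendors :=
    PySem.Dict.keys_foldl_insert vendors _ D
  have hFget : ∀ k, F.getD k PySem.Dict.empty
      = (pvApply tags)^[vendors.count k] (D.getD k PySem.Dict.empty) :=
    fun k => pv_fold_getD tags vendors k D
  have hDval : ∀ k, (D.getD k PySem.Dict.empty).keys.Nodup := by
    intro k; rw [hD]; exact pv_cfg_value_nodup cfg k
  rw [PySem.Dict.items_eq_map_keys F hFnd PySem.Dict.empty, hFkeys,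
      PySem.Set.update_eq_append_filter, List.map_append, List.map_append,
      List.map_map, List.map_map,
      PySem.Dict.items_eq_map_keys D hDnd PySem.Dict.empty, List.map_map]
  congr 1
  · -- the vendors already in the config, in config order
    apply List.map_congr_left
    intro k _
    simp only [Function.comp]
    rw [hFget k]
    by_cases hk : k ∈ vendors
    · obtain ⟨n, hn⟩ : ∃ n, vendors.count k = n + 1 :=
        ⟨vendors.count k - 1, (Nat.succ_pred_eq_of_pos (List.count_pos_iff.mpr hk)).symm⟩
      have hcont : (pvCnt vendors).contains k = true := by
        rw [pv_cnt_eq_counter, PySem.Dict.contains_counter]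
        simpa using hk
      have hm : (pvCnt vendors).getD k 0 = (n : Int) + 1 := by
        rw [pv_cnt_eq_counter, PySem.Dict.getD_counter, hn]
        push_cast ; ring
      rw [hn, pv_merged_eq tags n _ (hDval k), hcont, if_pos rfl, hm]
    · have hcnt0 : vendors.count k = 0 := List.count_eq_zero.mpr hk
      have hcont : (pvCnt vendors).contains k = false := by
        rw [pv_cnt_eq_counter, PySem.Dict.contains_counter]
        simpa using hk
      rw [hcnt0, Function.iterate_zero_apply, hcont, if_neg (by simp)]
  · -- the new vendors, in first-occurrence order
    rw [pv_cnt_eq_counter vendors, PySem.Dict.items_counter, List.filter_map, List.map_map]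
    have hpred : ((fun vm : String × Int => !D.contains vm.1) ∘
        (fun k => (k, ((vendors.count k : Int))))) = fun y => !PySem.Set.contains D.keys y := by
      funext y
      simp only [Function.comp]
      rw [pv_contains_keys]
    rw [hpred]
    apply List.map_congr_left
    intro k hk
    have hkD : k ∉ D.keys := by
      have hnc := (List.mem_filter.mp hk).2
      intro hmem
      have hc2 : PySem.Set.contains D.keys k = true :=
        (PySem.Set.contains_iff D.keys k).mpr hmem
      rw [hc2] at hnc
      simp at hnc
    have hkv : k ∈ vendors :=
      (PySem.Set.mem_ofList vendors k).mp (List.mem_filter.mp hk).1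
    obtain ⟨n, hn⟩ : ∃ n, vendors.count k = n + 1 :=
      ⟨vendors.count k - 1, (Nat.succ_pred_eq_of_pos (List.count_pos_iff.mpr hkv)).symm⟩
    have hDk : D.getD k PySem.Dict.empty = PySem.Dict.empty :=
      PySem.Dict.getD_of_not_contains D PySem.Dict.empty
        (by rw [PySem.Dict.contains_eq_decide_mem_keys]; simp [hkD])
    have hEnd : (PySem.Dict.empty : PySem.Dict String Int).keys.Nodup := by
      simp [PySem.Dict.keys_empty]
    simp only [Function.comp]
    rw [hFget k, hDk, hn, pv_merged_eq tags n _ hEnd]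
    norm_cast

-- ===== VERDICT (by name: the statement is the Claim_ definition above) =====
theorem update_vendor_tags_config_spec : Claim_equal_update_vendor_tags_config := by
  intro vendor_tags_config vendors tags _
  show update_vendor_tags_config vendor_tags_config vendors tags
      = update_vendor_tags_config_alt vendor_tags_config vendors tags
  exact pv_main vendor_tags_config vendors tags
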